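-- pv_equiv track=rewrite | github.com/ivan-dankovsky/homework | 25.01.2019_prime/14.py | max_c
-- ===== SOURCE A (Python) =====
-- def max_c(seq):
-- 	length = len(seq)
-- 	result = seq[0] + seq[-1]
--
-- 	for i in range(length-5):
-- 		for j in range(i+5, length):
-- 			if result < seq[i] + seq[j]:
-- 				result = seq[i] + seq[j]
--
-- 	return result
-- ===== SOURCE B (Python) =====
-- def max_c(seq):
--     best = seq[0] + seq[-1]
--     suf = []
--     for x in reversed(seq):
--         suf.append(x if not suf else max(x, suf[-1]))
--     suf.reverse()
--     for i in range(len(seq) - 5):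
--         best = max(best, seq[i] + suf[i + 5])
--     return best
-- ===== Notes on version B (the rewrite author's own statement) =====
-- stated objective: faster
-- what changed: Replaced A's nested double loop over all pairs (i,j) with j>=i+5 by a right-to-left suffix-maximum array built in one pass, so the answer is a single pass taking max(seq[i]+suf[i+5]).
import Mathlib
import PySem

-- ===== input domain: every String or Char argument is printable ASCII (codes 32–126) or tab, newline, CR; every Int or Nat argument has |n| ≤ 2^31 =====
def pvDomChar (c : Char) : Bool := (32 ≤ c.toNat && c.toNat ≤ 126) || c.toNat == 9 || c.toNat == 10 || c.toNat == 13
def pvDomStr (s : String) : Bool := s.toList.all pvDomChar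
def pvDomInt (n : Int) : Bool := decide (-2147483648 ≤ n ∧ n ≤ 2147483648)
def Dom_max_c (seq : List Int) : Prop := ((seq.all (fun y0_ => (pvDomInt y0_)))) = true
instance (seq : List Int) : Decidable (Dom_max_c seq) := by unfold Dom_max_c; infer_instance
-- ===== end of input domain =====

-- B replaces A's quadratic double loop by a right-to-left running-maximum (suffix-max) list
-- and a single pass over i; equal return value on every nonempty list.

-- ===== PORT A =====
def max_c (seq : List Int) : Int :=
  let length : Int := seq.length
  let result : Int := PySem.List.pyGetD seq 0 0 + PySem.List.pyGetD seq (-1) 0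
  (PySem.List.pyRange 0 (length - 5) 1).foldl
    (fun result i =>
      (PySem.List.pyRange (i + 5) length 1).foldl
        (fun result j =>
          if result < PySem.List.pyGetD seq i 0 + PySem.List.pyGetD seq j 0 then
            PySem.List.pyGetD seq i 0 + PySem.List.pyGetD seq j 0
          else result)
        result)
    result

-- ===== PORT B =====
-- running maximum accumulated from the right (B builds it by appending along reversed(seq))
def sufMaxB (seq : List Int) : List Int :=
  seq.foldr (fun x r => (match r with | [] => x | y :: _ => max x y) :: r) []

def max_c_alt (seq : List Int) : Int :=
  let suf := sufMaxB seq
  (PySem.List.pyRange 0 ((seq.length : Int) - 5) 1).foldl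
    (fun best i => max best (PySem.List.pyGetD seq i 0 + PySem.List.pyGetD suf (i + 5) 0))
    (PySem.List.pyGetD seq 0 0 + PySem.List.pyGetD seq (-1) 0)

-- ===== PRECONDITION & SPEC =====
-- A raises IndexError on the empty list (seq[0]); Pre_ excludes exactly that.
def Pre_max_c (seq : List Int) : Prop := seq ≠ []
instance (seq : List Int) : Decidable (Pre_max_c seq) := by unfold Pre_max_c; infer_instance
def pvWitness_max_c : List Int := ([1, 2, 3, 4, 5, 6, 7])

def Spec_max_c (seq : List Int) (out : Int) : Prop := out = max_c_alt seq
instance (seq : List Int) (out : Int) : Decidable (Spec_max_c seq out) := by unfold Spec_max_c; infer_instance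

-- ===== CLAIM (what is proved, stated in full; the proofs are below) =====
def Claim_equal_max_c : Prop := ∀ (seq : List Int), Dom_max_c seq → Pre_max_c seq → Spec_max_c seq (max_c seq)

-- ===== LEMMAS AND PROOFS =====

-- maximum of a nonempty list (spec-side helper for the proofs)
def mymax : List Int → Int
  | [] => 0
  | x :: xs => xs.foldl max x

theorem foldl_max_comm (ys : List Int) : ∀ (x y : Int), ys.foldl max (max x y) = max x (ys.foldl max y) := by
  induction ys with
  | nil => intro x y; rfl
  | cons z zs ih =>
    intro x y
    simp only [List.foldl_cons, max_assoc]
    exact ih x (max y z)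

theorem mymax_cons_cons (d e : Int) (es : List Int) :
    mymax (d :: e :: es) = max d (mymax (e :: es)) := by
  simp only [mymax, List.foldl_cons]
  exact foldl_max_comm es d e

theorem sufMaxB_length (seq : List Int) : (sufMaxB seq).length = seq.length := by
  induction seq with
  | nil => rfl
  | cons x xs ih => simp [sufMaxB] at ih ⊢; omega

theorem sufMaxB_cons (x : Int) (xs : List Int) :
    sufMaxB (x :: xs) = (match sufMaxB xs with | [] => x | y :: _ => max x y) :: sufMaxB xs := rfl

theorem sufMaxB_getElem? (seq : List Int) : ∀ (k : Nat), k < seq.length →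
    (sufMaxB seq)[k]? = some (mymax (seq.drop k)) := by
  induction seq with
  | nil => intro k hk; simp at hk
  | cons x xs ih =>
    intro k hk
    cases k with
    | zero =>
      rw [sufMaxB_cons, List.getElem?_cons_zero, List.drop_zero]
      rcases hsm : sufMaxB xs with _ | ⟨y, ys⟩
      · have hl := sufMaxB_length xs
        rw [hsm] at hl
        cases xs with
        | nil => simp [mymax]
        | cons e es => simp at hl
      · have hl := sufMaxB_length xs
        rw [hsm] at hl
        cases hxs : xs with
        | nil => rw [hxs] at hl; simp at hl
        | cons e es =>
          rw [hxs] at hsm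
          have := ih 0 (by rw [hxs]; simp)
          rw [hxs, hsm] at this
          simp only [List.getElem?_cons_zero, List.drop_zero] at this
          have hy' : y = mymax (e :: es) := by injection this
          rw [mymax_cons_cons, hy']
    | succ k =>
      rw [sufMaxB_cons, List.getElem?_cons_succ, List.drop_succ_cons]
      exact ih k (by simpa using hk)

-- the if-step of A's inner loop is a max
theorem if_step_eq_max (r c v : Int) : (if r < c + v then c + v else r) = max r (c + v) := by
  rcases le_or_gt (c + v) r with h | h
  · rw [if_neg (by omega), max_eq_left h]
  · rw [if_pos h, max_eq_right (le_of_lt h)]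

theorem foldl_max_list (ds : List Int) : ∀ (r c d : Int),
    ((d :: ds).foldl (fun r v => max r (c + v)) r) = max r (c + mymax (d :: ds)) := by
  induction ds with
  | nil => intro r c d; simp [mymax]
  | cons e es ih =>
    intro r c d
    have h1 := ih (max r (c + d)) c e
    simp only [List.foldl_cons] at h1 ⊢
    rw [h1, mymax_cons_cons]
    omega

theorem foldl_if_max (ds : List Int) (r c d : Int) :
    ((d :: ds).foldl (fun r v => if r < c + v then c + v else r) r) = max r (c + mymax (d :: ds)) := by
  simp only [if_step_eq_max]
  exact foldl_max_list ds r c d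

-- values of seq over the index range [a, len) are exactly seq.drop a
theorem map_pyRange_getD (seq : List Int) (a : Nat) (ha : a ≤ seq.length) :
    (PySem.List.pyRange (a : Int) (seq.length : Int) 1).map (fun j => PySem.List.pyGetD seq j 0)
      = seq.drop a := by
  rw [PySem.List.pyRange_one, List.map_map]
  apply List.ext_getElem
  · simp
  · intro k h1 h2
    simp only [List.getElem_map, List.getElem_range, Function.comp_apply]
    have hk : a + k < seq.length := by simp at h1; omega
    have : ((a : Int) + (k : Int)) = ((a + k : Nat) : Int) := by push_cast; ring
    rw [this, PySem.List.pyGetD_natCast]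
    rw [List.getElem_drop]
    simp [List.getD, hk]

-- A's inner loop collapses to one max against the suffix maximum
theorem inner_loop_eq (seq : List Int) (i : Int) (r : Int)
    (h0 : 0 ≤ i) (h5 : i + 5 < (seq.length : Int)) :
    (PySem.List.pyRange (i + 5) (seq.length : Int) 1).foldl
        (fun r j => if r < PySem.List.pyGetD seq i 0 + PySem.List.pyGetD seq j 0 then
            PySem.List.pyGetD seq i 0 + PySem.List.pyGetD seq j 0 else r) r
      = max r (PySem.List.pyGetD seq i 0 + PySem.List.pyGetD (sufMaxB seq) (i + 5) 0) := by
  set c := PySem.List.pyGetD seq i 0 with hc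
  have ha : (i + 5) = (((i + 5).toNat : Nat) : Int) := by omega
  have hle : (i + 5).toNat ≤ seq.length := by omega
  have hlt : (i + 5).toNat < seq.length := by omega
  have hmap := map_pyRange_getD seq (i + 5).toNat hle
  rw [← ha] at hmap
  have hfold : (PySem.List.pyRange (i + 5) (seq.length : Int) 1).foldl
        (fun r j => if r < c + PySem.List.pyGetD seq j 0 then c + PySem.List.pyGetD seq j 0 else r) r
      = (seq.drop (i + 5).toNat).foldl (fun r v => if r < c + v then c + v else r) r := by
    rw [← hmap, List.foldl_map]
  rw [hfold]
  rcases hd : seq.drop (i + 5).toNat with _ | ⟨d, ds⟩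
  · exfalso
    have hlen : (seq.drop (i + 5).toNat).length = seq.length - (i + 5).toNat := by simp
    rw [hd] at hlen
    simp at hlen
    omega
  · rw [foldl_if_max]
    congr 1
    have hget : PySem.List.pyGetD (sufMaxB seq) (i + 5) 0 = mymax (seq.drop (i + 5).toNat) := by
      rw [ha, PySem.List.pyGetD_natCast]
      simp only [Int.toNat_natCast]
      rw [List.getD_eq_getElem?_getD, sufMaxB_getElem? seq (i + 5).toNat hlt]
      rfl
    rw [hget, hd]

-- ===== VERDICT (by name: the statement is the Claim_ definition above) =====
theorem max_c_spec : Claim_equal_max_c := by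
  intro seq _ _
  unfold Spec_max_c max_c max_c_alt
  simp only []
  apply PySem.List.foldl_congr_mem
  intro acc i hi
  have hmem := (PySem.List.mem_pyRange_one).1 hi
  exact inner_loop_eq seq i acc hmem.1 (by omega)
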